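-- pv_equiv track=rewrite | github.com/a-tal/fallingsky | fallingsky/walls.py | arcade_mode
-- ===== SOURCE A (Python) =====
-- def arcade_mode(resolution=(960, 640), blocksize=16, width=20, height=70):
--     """Builds regular boring, but scalable, rectangular walls.
--
--     If given values that are too much to fit at the resolution and blocksize,
--     it just fits as many as it can with some amount of space for next blocks,
--     the hold block, stats...
--
--     Args::
--
--         resolution: (x, y) tuple of total screen width and height
--         blocksize: pixel height per block
--         width: integer number of blocks wide for the map
--         height: integer number of blocks high for the map
--
--     Returns::
--
--         a tuple of a list of (x, y) coords of all walls (includes invisible),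
--         and a list of (x, y) coords of all visible walls for sprites/images
--     """
--
--     blocks_wide = int(resolution[0] / blocksize)
--     blocks_high = int(resolution[1] / blocksize)
--
--     mapwidth = str(blocks_wide)
--     mapheight = str(blocks_high)
--     tilewidth = tileheight = str(blocksize)
--
--     centre_block = int(blocks_wide / 2)
--     spread = int(width / 2)
--
--     walls = []        # walls includes the invisible walls
--     wall_blocks = []  # the coords to spawn wall blocks on
--     for x_coord in range(centre_block - (spread + 1),
--                          centre_block + (width - spread) + 1):
--         # making walls the entire y-axis to prevent over the top/overhangs
--         for y_coord in range(blocks_high):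
--             if (x_coord == centre_block - (spread + 1)) or \
--                    (x_coord == centre_block + (width - spread)) or \
--                    (y_coord == blocks_high - 2):
--                 # but only spawn wall block sprites where walls are :)
--                 coord = ((x_coord * blocksize), (y_coord * blocksize))
--                 if blocks_high - height < y_coord < blocks_high - 1:
--                     wall_blocks.append(coord)
--                 walls.append(coord)
--
--     return walls, wall_blocks
-- ===== SOURCE B (Python) =====
-- def arcade_mode(resolution=(960, 640), blocksize=16, width=20, height=70):
--     """Same walls as A, but emits only the two edge columns and the single
--     interior shelf row directly instead of scanning every (x, y) cell."""
--     blocks_wide = int(resolution[0] / blocksize)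
--     blocks_high = int(resolution[1] / blocksize)
--     centre_block = int(blocks_wide / 2)
--     spread = int(width / 2)
--     left = centre_block - (spread + 1)
--     right = centre_block + (width - spread)
--
--     vis_lo = max(0, blocks_high - height + 1)
--     vis_hi = blocks_high - 1  # exclusive upper bound of the visible band
--
--     def column(x):
--         px = x * blocksize
--         return ([(px, y * blocksize) for y in range(blocks_high)],
--                 [(px, y * blocksize) for y in range(vis_lo, vis_hi)])
--
--     if right < left:
--         return [], []
--     if left == right:
--         return column(left)
--
--     left_walls, left_vis = column(left)
--     right_walls, right_vis = column(right)
--     row_y = (blocks_high - 2) * blocksize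
--     mid = ([(x * blocksize, row_y) for x in range(left + 1, right)]
--            if blocks_high >= 2 else [])
--     mid_vis = mid if blocks_high >= 2 and height > 2 else []
--     return (left_walls + mid + right_walls,
--             left_vis + mid_vis + right_vis)
-- ===== Notes on version B (the rewrite author's own statement) =====
-- stated objective: faster
-- what changed: Instead of scanning every (x,y) cell of the map rectangle and testing each against the edge/shelf condition, B emits the two edge columns and the single interior shelf row (and their visible sub-bands) directly from closed-form range bounds, doing O(W+H) work instead of O(W*H) loop iterations.
import Mathlib
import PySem

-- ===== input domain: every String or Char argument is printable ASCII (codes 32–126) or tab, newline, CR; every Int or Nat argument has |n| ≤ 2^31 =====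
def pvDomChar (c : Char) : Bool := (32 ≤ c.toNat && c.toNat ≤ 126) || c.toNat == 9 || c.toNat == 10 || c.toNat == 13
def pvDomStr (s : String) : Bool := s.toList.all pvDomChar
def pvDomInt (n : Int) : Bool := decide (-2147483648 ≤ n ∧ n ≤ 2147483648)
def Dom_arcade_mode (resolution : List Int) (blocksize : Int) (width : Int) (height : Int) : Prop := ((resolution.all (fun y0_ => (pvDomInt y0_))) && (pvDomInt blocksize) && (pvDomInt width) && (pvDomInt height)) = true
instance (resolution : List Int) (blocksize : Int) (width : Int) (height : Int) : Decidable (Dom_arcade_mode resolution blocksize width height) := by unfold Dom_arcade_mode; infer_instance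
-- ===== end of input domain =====

-- B emits only the two edge columns and the single interior shelf row directly
-- (closed-form range bounds) instead of scanning every (x, y) cell as A does.


-- ===== PORT A =====
-- Literal transliteration of A: outer x-loop over range(centre-(spread+1), centre+(width-spread)+1),
-- inner y-loop over range(blocks_high), appending to the two lists when the cell is on an
-- edge column or on the y == blocks_high - 2 row (the block list only inside the visible band).
-- int(a / b) is exact truncating division for |a|,|b| ≤ 2^31 (PySem.Int.truncdiv);
-- Pre_ guarantees resolution[0]/resolution[1] exist and blocksize ≠ 0, so getD 0 is never taken.
def arcade_mode (resolution : List Int) (blocksize : Int) (width : Int) (height : Int) : (List (Int × Int)) × (List (Int × Int)) :=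
  let r0 := (PySem.List.pyGet? resolution 0).getD 0
  let r1 := (PySem.List.pyGet? resolution 1).getD 0
  let blocks_wide := PySem.Int.truncdiv r0 blocksize
  let blocks_high := PySem.Int.truncdiv r1 blocksize
  let centre_block := PySem.Int.truncdiv blocks_wide 2
  let spread := PySem.Int.truncdiv width 2
  (PySem.List.pyRange (centre_block - (spread + 1)) (centre_block + (width - spread) + 1) 1).foldl
    (fun st x =>
      (PySem.List.pyRange 0 blocks_high 1).foldl
        (fun st y =>
          if x = centre_block - (spread + 1) ∨ x = centre_block + (width - spread) ∨ y = blocks_high - 2 then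
            (st.1 ++ [(x * blocksize, y * blocksize)],
             if blocks_high - height < y ∧ y < blocks_high - 1 then
               st.2 ++ [(x * blocksize, y * blocksize)]
             else st.2)
          else st) st)
    ([], [])

-- ===== PORT B =====
-- helper `column` of Source B: one full wall column plus its visible sub-range
def pvColumn (blocksize blocks_high vis_lo vis_hi x : Int) : (List (Int × Int)) × (List (Int × Int)) :=
  let px := x * blocksize
  ((PySem.List.pyRange 0 blocks_high 1).map (fun y => (px, y * blocksize)),
   (PySem.List.pyRange vis_lo vis_hi 1).map (fun y => (px, y * blocksize)))

def arcade_mode_alt (resolution : List Int) (blocksize : Int) (width : Int) (height : Int) : (List (Int × Int)) × (List (Int × Int)) :=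
  let r0 := (PySem.List.pyGet? resolution 0).getD 0
  let r1 := (PySem.List.pyGet? resolution 1).getD 0
  let blocks_wide := PySem.Int.truncdiv r0 blocksize
  let blocks_high := PySem.Int.truncdiv r1 blocksize
  let centre_block := PySem.Int.truncdiv blocks_wide 2
  let spread := PySem.Int.truncdiv width 2
  let left := centre_block - (spread + 1)
  let right := centre_block + (width - spread)
  let vis_lo := max 0 (blocks_high - height + 1)
  let vis_hi := blocks_high - 1
  if right < left then ([], [])
  else if left = right then pvColumn blocksize blocks_high vis_lo vis_hi left
  else
    let lc := pvColumn blocksize blocks_high vis_lo vis_hi left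
    let rc := pvColumn blocksize blocks_high vis_lo vis_hi right
    let row_y := (blocks_high - 2) * blocksize
    let mid := if 2 ≤ blocks_high then
        (PySem.List.pyRange (left + 1) right 1).map (fun x => (x * blocksize, row_y))
      else []
    let mid_vis := if 2 ≤ blocks_high ∧ 2 < height then mid else []
    (lc.1 ++ mid ++ rc.1, lc.2 ++ mid_vis ++ rc.2)

-- ===== PRECONDITION & SPEC =====
-- A indexes resolution[0] and resolution[1] (IndexError if absent) and divides by
-- blocksize (ZeroDivisionError if 0); exactly those raising inputs are excluded.
def Pre_arcade_mode (resolution : List Int) (blocksize : Int) (width : Int) (height : Int) : Prop :=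
  2 ≤ resolution.length ∧ blocksize ≠ 0
instance (resolution : List Int) (blocksize : Int) (width : Int) (height : Int) : Decidable (Pre_arcade_mode resolution blocksize width height) := by unfold Pre_arcade_mode; infer_instance

def pvWitness_arcade_mode : List Int × Int × Int × Int := ([960, 640], 16, 20, 70)

def Spec_arcade_mode (resolution : List Int) (blocksize : Int) (width : Int) (height : Int) (out : (List (Int × Int)) × (List (Int × Int))) : Prop := out = arcade_mode_alt resolution blocksize width height
instance (resolution : List Int) (blocksize : Int) (width : Int) (height : Int) (out : (List (Int × Int)) × (List (Int × Int))) : Decidable (Spec_arcade_mode resolution blocksize width height out) := by unfold Spec_arcade_mode; infer_instance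

-- ===== CLAIM (what is proved, stated in full; the proofs are below) =====
def Claim_equal_arcade_mode : Prop := ∀ (resolution : List Int) (blocksize : Int) (width : Int) (height : Int), Dom_arcade_mode resolution blocksize width height → Pre_arcade_mode resolution blocksize width height → Spec_arcade_mode resolution blocksize width height (arcade_mode resolution blocksize width height)

-- ===== LEMMAS AND PROOFS =====

-- filtering a step-1 range by an open interval yields the clipped sub-range
lemma pv_filter_pyRange_interval (lo hi : Int) : ∀ (n : Nat) (a b : Int), (b - a).toNat ≤ n →
    (PySem.List.pyRange a b 1).filter (fun y => decide (lo < y ∧ y < hi))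
      = PySem.List.pyRange (max a (lo + 1)) (min b hi) 1 := by
  intro n
  induction n with
  | zero =>
    intro a b h
    have h1 := le_max_left a (lo + 1)
    have h2 := min_le_left b hi
    rw [PySem.List.pyRange_one_eq_nil (by omega), PySem.List.pyRange_one_eq_nil (by omega)]
    rfl
  | succ n ih =>
    intro a b h
    by_cases hab : b ≤ a
    · have h1 := le_max_left a (lo + 1)
      have h2 := min_le_left b hi
      rw [PySem.List.pyRange_one_eq_nil hab, PySem.List.pyRange_one_eq_nil (by omega)]
      rfl
    · rw [PySem.List.pyRange_one_cons (by omega), List.filter_cons, ih (a + 1) b (by omega)]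
      by_cases hin : lo < a ∧ a < hi
      · have h1 : max a (lo + 1) = a := by
          rcases le_total a (lo + 1) with hc | hc <;> simp [hc] <;> omega
        have h2 : max (a + 1) (lo + 1) = a + 1 := by
          rcases le_total (a + 1) (lo + 1) with hc | hc <;> simp [hc] <;> omega
        have h3 : a < min b hi := by
          have := lt_min (show a < b by omega) (show a < hi by omega); omega
        rw [h1, h2]
        conv_rhs => rw [PySem.List.pyRange_one_cons h3]
        simp [hin]
      · simp only [hin, decide_false, Bool.false_eq_true, if_false]
        rcases (by omega : a ≤ lo ∨ hi ≤ a) with hc | hc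
        · have h1 : max a (lo + 1) = lo + 1 := max_eq_right (by omega)
          have h2 : max (a + 1) (lo + 1) = lo + 1 := max_eq_right (by omega)
          rw [h1, h2]
        · have h1 := le_max_left a (lo + 1)
          have h2 := le_max_left (a + 1) (lo + 1)
          have h3 := min_le_right b hi
          rw [PySem.List.pyRange_one_eq_nil (by omega), PySem.List.pyRange_one_eq_nil (by omega)]

-- filtering a step-1 range by equality with a constant
lemma pv_filter_pyRange_eq (c : Int) : ∀ (n : Nat) (a b : Int), (b - a).toNat ≤ n →
    (PySem.List.pyRange a b 1).filter (fun y => decide (y = c))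
      = if a ≤ c ∧ c < b then [c] else [] := by
  intro n
  induction n with
  | zero =>
    intro a b h
    rw [PySem.List.pyRange_one_eq_nil (by omega), if_neg (by omega)]
    rfl
  | succ n ih =>
    intro a b h
    by_cases hab : b ≤ a
    · rw [PySem.List.pyRange_one_eq_nil hab, if_neg (by omega)]
      rfl
    · rw [PySem.List.pyRange_one_cons (by omega), List.filter_cons, ih (a + 1) b (by omega)]
      by_cases hac : a = c
      · subst hac
        have hX : (if a + 1 ≤ a ∧ a < b then [a] else ([] : List Int)) = [] := if_neg (by omega)
        rw [hX]
        simp [show a < b by omega]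
      · rw [if_congr (by omega : (a + 1 ≤ c ∧ c < b) ↔ (a ≤ c ∧ c < b)) rfl rfl]
        simp [hac]

-- closed form of A's inner y-loop at a fixed column x
lemma pv_inner_gen (bs bh ht L R x : Int) : ∀ (l : List Int) (st : (List (Int × Int)) × (List (Int × Int))),
    l.foldl
      (fun st y =>
        if x = L ∨ x = R ∨ y = bh - 2 then
          (st.1 ++ [(x * bs, y * bs)],
           if bh - ht < y ∧ y < bh - 1 then st.2 ++ [(x * bs, y * bs)] else st.2)
        else st) st
    = (st.1 ++ (l.filter (fun y => decide (x = L ∨ x = R ∨ y = bh - 2))).map (fun y => (x * bs, y * bs)),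
       st.2 ++ (l.filter (fun y => decide ((x = L ∨ x = R ∨ y = bh - 2) ∧ (bh - ht < y ∧ y < bh - 1)))).map
          (fun y => (x * bs, y * bs))) := by
  intro l
  induction l with
  | nil => intro st; simp
  | cons y l ih =>
    intro st
    rw [List.foldl_cons, ih]
    by_cases h1 : x = L ∨ x = R ∨ y = bh - 2 <;> by_cases h2 : bh - ht < y ∧ y < bh - 1 <;>
      simp [h1, h2]

-- a fold appending per-item contributions to both components is a pair of flatMaps
lemma pv_outer (W B : Int → List (Int × Int)) (l : List Int) :
    l.foldl (fun st x => (st.1 ++ W x, st.2 ++ B x)) ([], [])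
      = (l.flatMap W, l.flatMap B) := by
  rw [PySem.List.foldl_prod_mk (f := fun acc x => acc ++ W x) (g := fun acc x => acc ++ B x),
      PySem.List.foldl_append_eq_flatMap, PySem.List.foldl_append_eq_flatMap]
  simp

-- an edge column keeps every y of the full range …
lemma pv_edge_w (bs bh L R x : Int) (hx : x = L ∨ x = R) :
    ((PySem.List.pyRange 0 bh 1).filter (fun y => decide (x = L ∨ x = R ∨ y = bh - 2))).map
        (fun y => (x * bs, y * bs))
    = (PySem.List.pyRange 0 bh 1).map (fun y => (x * bs, y * bs)) := by
  rw [List.filter_eq_self.mpr (fun y hy => by rcases hx with hx | hx <;> simp [hx])]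

-- … and its visible blocks are exactly the clipped band
lemma pv_edge_b (bs bh ht L R x : Int) (hx : x = L ∨ x = R) :
    ((PySem.List.pyRange 0 bh 1).filter
        (fun y => decide ((x = L ∨ x = R ∨ y = bh - 2) ∧ (bh - ht < y ∧ y < bh - 1)))).map
        (fun y => (x * bs, y * bs))
    = (PySem.List.pyRange (max 0 (bh - ht + 1)) (bh - 1) 1).map (fun y => (x * bs, y * bs)) := by
  rw [List.filter_congr (fun y hy => (by
      rcases hx with hx | hx <;> simp [hx] :
      decide ((x = L ∨ x = R ∨ y = bh - 2) ∧ (bh - ht < y ∧ y < bh - 1))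
        = decide (bh - ht < y ∧ y < bh - 1)))]
  rw [pv_filter_pyRange_interval (bh - ht) (bh - 1) bh.toNat 0 bh (by omega)]
  rw [show min bh (bh - 1) = bh - 1 from min_eq_right (by omega)]

-- an interior column contributes only the shelf cell y = bh - 2 (if it exists)
lemma pv_int_walls (bs bh L R x : Int) (hx1 : x ≠ L) (hx2 : x ≠ R) :
    ((PySem.List.pyRange 0 bh 1).filter (fun y => decide (x = L ∨ x = R ∨ y = bh - 2))).map
        (fun y => (x * bs, y * bs))
    = if 2 ≤ bh then [(x * bs, (bh - 2) * bs)] else [] := by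
  rw [List.filter_congr (fun y hy => (by simp [hx1, hx2] :
      decide (x = L ∨ x = R ∨ y = bh - 2) = decide (y = bh - 2)))]
  rw [pv_filter_pyRange_eq (bh - 2) bh.toNat 0 bh (by omega)]
  rw [if_congr (by omega : (0 ≤ bh - 2 ∧ bh - 2 < bh) ↔ 2 ≤ bh) rfl rfl,
      apply_ite (List.map (fun y => (x * bs, y * bs)))]
  simp

-- … and its shelf cell is visible exactly when height > 2
lemma pv_int_blocks (bs bh ht L R x : Int) (hx1 : x ≠ L) (hx2 : x ≠ R) :
    ((PySem.List.pyRange 0 bh 1).filter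
        (fun y => decide ((x = L ∨ x = R ∨ y = bh - 2) ∧ (bh - ht < y ∧ y < bh - 1)))).map
        (fun y => (x * bs, y * bs))
    = if 2 ≤ bh ∧ 2 < ht then [(x * bs, (bh - 2) * bs)] else [] := by
  by_cases hht : 2 < ht
  · rw [List.filter_congr (show ∀ y ∈ PySem.List.pyRange 0 bh 1,
        decide ((x = L ∨ x = R ∨ y = bh - 2) ∧ (bh - ht < y ∧ y < bh - 1)) = decide (y = bh - 2)
        from fun y hy => decide_eq_decide.mpr (by omega))]
    rw [pv_filter_pyRange_eq (bh - 2) bh.toNat 0 bh (by omega)]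
    rw [if_congr (by omega : (0 ≤ bh - 2 ∧ bh - 2 < bh) ↔ (2 ≤ bh ∧ 2 < ht)) rfl rfl,
        apply_ite (List.map (fun y => (x * bs, y * bs)))]
    simp
  · rw [List.filter_congr (show ∀ y ∈ PySem.List.pyRange 0 bh 1,
        decide ((x = L ∨ x = R ∨ y = bh - 2) ∧ (bh - ht < y ∧ y < bh - 1)) = false
        from fun y hy => by simp only [decide_eq_false_iff_not]; omega)]
    rw [if_neg (by omega : ¬ (2 ≤ bh ∧ 2 < ht))]
    simp

-- the pair of flatMaps over the columns is exactly B's edge/shelf decomposition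
lemma pv_main (bs bh ht L R : Int) :
    ((PySem.List.pyRange L (R + 1) 1).flatMap (fun x =>
        ((PySem.List.pyRange 0 bh 1).filter (fun y => decide (x = L ∨ x = R ∨ y = bh - 2))).map
          (fun y => (x * bs, y * bs))),
     (PySem.List.pyRange L (R + 1) 1).flatMap (fun x =>
        ((PySem.List.pyRange 0 bh 1).filter
          (fun y => decide ((x = L ∨ x = R ∨ y = bh - 2) ∧ (bh - ht < y ∧ y < bh - 1)))).map
          (fun y => (x * bs, y * bs))))
    = if R < L then ([], [])
      else if L = R then pvColumn bs bh (max 0 (bh - ht + 1)) (bh - 1) L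
      else
        ((pvColumn bs bh (max 0 (bh - ht + 1)) (bh - 1) L).1
            ++ (if 2 ≤ bh then (PySem.List.pyRange (L + 1) R 1).map (fun x => (x * bs, (bh - 2) * bs)) else [])
            ++ (pvColumn bs bh (max 0 (bh - ht + 1)) (bh - 1) R).1,
         (pvColumn bs bh (max 0 (bh - ht + 1)) (bh - 1) L).2
            ++ (if 2 ≤ bh ∧ 2 < ht then
                  (if 2 ≤ bh then (PySem.List.pyRange (L + 1) R 1).map (fun x => (x * bs, (bh - 2) * bs)) else [])
                else [])
            ++ (pvColumn bs bh (max 0 (bh - ht + 1)) (bh - 1) R).2) := by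
  by_cases hRL : R < L
  · rw [if_pos hRL, PySem.List.pyRange_one_eq_nil (show R + 1 ≤ L by omega)]
    simp
  · rw [if_neg hRL]
    by_cases hLR : L = R
    · rw [if_pos hLR]
      have hr : R + 1 = L + 1 := by omega
      rw [hr, PySem.List.pyRange_one_singleton, List.flatMap_cons, List.flatMap_nil,
          List.append_nil, List.flatMap_cons, List.flatMap_nil, List.append_nil]
      rw [pv_edge_w bs bh L R L (Or.inl rfl), pv_edge_b bs bh ht L R L (Or.inl rfl)]
      rfl
    · rw [if_neg hLR]
      have hW := List.flatMap_congr (l := PySem.List.pyRange (L + 1) R 1)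
        (fun x hx => pv_int_walls bs bh L R x
          (by have := (PySem.List.mem_pyRange_one).mp hx; omega)
          (by have := (PySem.List.mem_pyRange_one).mp hx; omega))
      have hB := List.flatMap_congr (l := PySem.List.pyRange (L + 1) R 1)
        (fun x hx => pv_int_blocks bs bh ht L R x
          (by have := (PySem.List.mem_pyRange_one).mp hx; omega)
          (by have := (PySem.List.mem_pyRange_one).mp hx; omega))
      refine Prod.ext ?_ ?_
      · show (PySem.List.pyRange L (R + 1) 1).flatMap _ = _
        rw [PySem.List.pyRange_one_cons (by omega : L < R + 1),
            PySem.List.pyRange_one_succ_right (by omega : L + 1 ≤ R),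
            List.flatMap_cons, List.flatMap_append, List.flatMap_cons, List.flatMap_nil,
            List.append_nil]
        rw [pv_edge_w bs bh L R L (Or.inl rfl), pv_edge_w bs bh L R R (Or.inr rfl), hW]
        by_cases hbh : 2 ≤ bh
        · simp [pvColumn, hbh, ← List.map_eq_flatMap, List.append_assoc]
        · simp [pvColumn, hbh]
      · show (PySem.List.pyRange L (R + 1) 1).flatMap _ = _
        rw [PySem.List.pyRange_one_cons (by omega : L < R + 1),
            PySem.List.pyRange_one_succ_right (by omega : L + 1 ≤ R),
            List.flatMap_cons, List.flatMap_append, List.flatMap_cons, List.flatMap_nil,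
            List.append_nil]
        rw [pv_edge_b bs bh ht L R L (Or.inl rfl), pv_edge_b bs bh ht L R R (Or.inr rfl), hB]
        by_cases hbh : 2 ≤ bh <;> by_cases hht : 2 < ht <;>
          simp [hbh, hht, pvColumn, ← List.map_eq_flatMap, List.append_assoc]

-- ===== VERDICT (by name: the statement is the Claim_ definition above) =====
theorem arcade_mode_spec : Claim_equal_arcade_mode := by
  intro resolution blocksize width height _ _
  unfold Spec_arcade_mode arcade_mode arcade_mode_alt
  simp only [pv_inner_gen]
  rw [pv_outer]
  exact pv_main _ _ _ _ _
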